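-- pv_equiv track=rewrite | github.com/mingjie-wang97/MingjieWang-AlgorithmLearning | wish/wish_prepare.py | runningGame
-- ===== SOURCE A (Python) =====
-- def runningGame(n):
--     # time: O(N^2), space: O(N^2)
--     # edge case
--     # 1 people -> 1 solution
--     if n <= 2:
--         return n
--     # main function
--     # create a dp -> dp[i][j] = i people in j group
--     dp = [[0 for _ in range(n)] for _ in range(n)]
--     for i in range(n):
--         dp[i][0] = 1
--     for i in range(1, n):
--         for j in range(1, i+1):
--             dp[i][j] = (dp[i-1][j-1] + dp[i-1][j]) * (j+1)
--     return sum(dp[-1])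
-- ===== SOURCE B (Python) =====
-- def runningGame(n):
--     # Ordered-Bell (Fubini) numbers via binomial convolution: a[m] = sum_{k=1..m} C(m,k)*a[m-k].
--     # O(n) space instead of A's n*n table; keeps A's n <= 2 guard.
--     if n <= 2:
--         return n
--     a = [1]
--     for m in range(1, n + 1):
--         c = 1  # C(m, 0)
--         total = 0
--         for k in range(1, m + 1):
--             c = c * (m - k + 1) // k  # C(m, k), exact integer division
--             total += c * a[m - k]
--         a.append(total)
--     return a[n]
-- ===== Notes on version B (the rewrite author's own statement) =====
-- stated objective: alternative
-- what changed: Replaces A's n-by-n dp table (filled with a doubly nested loop and summed along its last row) by the 1-D binomial-convolution recurrence for the ordered-Bell numbers, a[m] = sum_{k=1..m} C(m,k)*a[m-k], with the binomial coefficient maintained by the exact multiplicative update c = c*(m-k+1)//k; A's n <= 2 guard is kept.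
import Mathlib
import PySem

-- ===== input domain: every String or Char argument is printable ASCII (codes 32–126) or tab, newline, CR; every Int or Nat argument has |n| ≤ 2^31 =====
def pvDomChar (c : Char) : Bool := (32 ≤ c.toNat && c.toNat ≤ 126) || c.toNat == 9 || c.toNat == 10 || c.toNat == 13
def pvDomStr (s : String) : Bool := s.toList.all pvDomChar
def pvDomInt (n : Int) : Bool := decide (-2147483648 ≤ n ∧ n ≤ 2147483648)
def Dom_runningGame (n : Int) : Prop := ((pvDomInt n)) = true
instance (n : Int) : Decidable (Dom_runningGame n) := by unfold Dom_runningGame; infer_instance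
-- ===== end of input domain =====

-- B replaces A's n×n dp table (summed on its last row) by the 1-D binomial-convolution
-- recurrence for the ordered-Bell numbers, a[m] = Σ_{k=1..m} C(m,k)·a[m-k]; objective: alternative (O(n) space).

-- ===== PORT A =====
-- All indices produced below lie in range for Python (0 ≤ i,j < n with n ≥ 3), so the
-- total forms pyGetD/pySetD are exact for A's dp[i][j] reads and writes.
def runningGame (n : Int) : Int :=
  if n ≤ 2 then n
  else
    -- dp = [[0 for _ in range(n)] for _ in range(n)]
    let dp0 : List (List Int) :=
      (PySem.List.pyRange 0 n 1).map (fun _ => (PySem.List.pyRange 0 n 1).map (fun _ => (0 : Int)))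
    -- for i in range(n): dp[i][0] = 1
    let dp1 :=
      (PySem.List.pyRange 0 n 1).foldl
        (fun dp i => PySem.List.pySetD dp i (PySem.List.pySetD (PySem.List.pyGetD dp i []) 0 1)) dp0
    -- for i in range(1, n): for j in range(1, i+1): dp[i][j] = (dp[i-1][j-1] + dp[i-1][j]) * (j+1)
    let dp2 :=
      (PySem.List.pyRange 1 n 1).foldl
        (fun dp i =>
          (PySem.List.pyRange 1 (i + 1) 1).foldl
            (fun dp j =>
              PySem.List.pySetD dp i
                (PySem.List.pySetD (PySem.List.pyGetD dp i []) j
                  ((PySem.List.pyGetD (PySem.List.pyGetD dp (i - 1) []) (j - 1) 0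
                    + PySem.List.pyGetD (PySem.List.pyGetD dp (i - 1) []) j 0) * (j + 1)))) dp) dp1
    -- return sum(dp[-1])
    (PySem.List.pyGetD dp2 (-1) []).sum

-- ===== PORT B =====
-- c tracks C(m,k) via the exact multiplicative update c = c*(m-k+1)//k; the indices m-k
-- are in range (0 ≤ m-k < len a), so pyGetD is exact for a[m-k].
def runningGame_alt (n : Int) : Int :=
  if n ≤ 2 then n
  else
    let a : List Int :=
      (PySem.List.pyRange 1 (n + 1) 1).foldl
        (fun a m =>
          let st :=
            (PySem.List.pyRange 1 (m + 1) 1).foldl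
              (fun (st : Int × Int) k =>
                let c := PySem.Int.floordiv (st.1 * (m - k + 1)) k
                (c, st.2 + c * PySem.List.pyGetD a (m - k) 0))
              (1, 0)
          a ++ [st.2]) [1]
    PySem.List.pyGetD a n 0

-- ===== PRECONDITION & SPEC =====
def Spec_runningGame (n : Int) (out : Int) : Prop := out = runningGame_alt n
instance (n : Int) (out : Int) : Decidable (Spec_runningGame n out) := by unfold Spec_runningGame; infer_instance

-- ===== CLAIM (what is proved, stated in full; the proofs are below) =====
def Claim_equal_runningGame : Prop := ∀ (n : Int), Dom_runningGame n → Spec_runningGame n (runningGame n)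

-- ===== LEMMAS AND PROOFS =====

-- Sj n k = number of surjections of an n-set onto k ordered blocks (as an integer),
-- defined by the recurrence A's dp table follows: dp[i][j] = Sj (i+1) (j+1).
def Sj : Nat → Nat → Int
  | 0, 0 => 1
  | 0, _ + 1 => 0
  | _ + 1, 0 => 0
  | n + 1, k + 1 => ((k : Int) + 1) * (Sj n k + Sj n (k + 1))

-- fub n = ordered Bell number = Σ_k Sj n k.
def fub (n : Nat) : Int := ∑ k ∈ Finset.range (n + 1), Sj n k

lemma Sj_zero_of_lt : ∀ (n k : Nat), n < k → Sj n k = 0 := by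
  intro n
  induction n with
  | zero => intro k hk; obtain ⟨k', rfl⟩ := Nat.exists_eq_succ_of_ne_zero (by omega : k ≠ 0); rfl
  | succ n ih =>
    intro k hk
    obtain ⟨k', rfl⟩ := Nat.exists_eq_succ_of_ne_zero (by omega : k ≠ 0)
    simp only [Sj, ih k' (by omega), ih (k' + 1) (by omega)]
    ring

lemma Sj_succ_zero (n : Nat) : Sj (n + 1) 0 = 0 := rfl

lemma Sj_one : ∀ (n : Nat), Sj (n + 1) 1 = 1 := by
  intro n
  induction n with
  | zero => decide
  | succ n ih => show (0 + 1 : Int) * (Sj (n + 1) 0 + Sj (n + 1) 1) = 1; rw [Sj_succ_zero, ih]; ring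

-- The binomial-convolution characterisation of Sj, derived purely from the recurrence.
lemma Sj_conv : ∀ (n k : Nat),
    Sj n (k + 1) = ∑ j ∈ Finset.range n, ((n.choose (j + 1) : Int)) * Sj (n - (j + 1)) k := by
  intro n
  induction n with
  | zero => intro k; simp [Sj]
  | succ n ih =>
    intro k
    cases k with
    | zero =>
      rw [Sj_one n]
      rw [Finset.sum_eq_single_of_mem n (Finset.self_mem_range_succ n)]
      · have h1 : n + 1 - (n + 1) = 0 := by omega
        rw [h1]
        simp [Sj, Nat.choose_self]
      · intro j hj hjn
        have hjlt : j < n := by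
          have := Finset.mem_range.mp hj; omega
        obtain ⟨m, hm⟩ : ∃ m, n + 1 - (j + 1) = m + 1 := ⟨n - j - 1, by omega⟩
        rw [hm, Sj_succ_zero, mul_zero]
    | succ k =>
      -- LHS = (k+2) * (Sj n (k+1) + Sj n (k+2))
      have hL : Sj (n + 1) (k + 1 + 1) = ((k : Int) + 2) * (Sj n (k + 1) + Sj n (k + 2)) := by
        show ((((k + 1 : Nat)) : Int) + 1) * (Sj n (k + 1) + Sj n (k + 1 + 1)) = _
        push_cast; ring
      rw [hL]
      -- rewrite each summand with Pascal's rule and the index identity (n+1)-(j+1) = n-j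
      have hsub : ∀ j, n + 1 - (j + 1) = n - j := by intro j; omega
      have hsplit :
          (∑ j ∈ Finset.range (n + 1), ((n + 1).choose (j + 1) : Int) * Sj (n + 1 - (j + 1)) (k + 1))
            = (∑ j ∈ Finset.range (n + 1), ((n.choose j : Int)) * Sj (n - j) (k + 1))
              + (∑ j ∈ Finset.range (n + 1), ((n.choose (j + 1) : Int)) * Sj (n - j) (k + 1)) := by
        rw [← Finset.sum_add_distrib]
        refine Finset.sum_congr rfl ?_
        intro j _
        rw [hsub j, Nat.choose_succ_succ]
        push_cast; ring
      rw [hsplit]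
      -- first sum = Sj n (k+2) + Sj n (k+1)
      have hS1 : (∑ j ∈ Finset.range (n + 1), ((n.choose j : Int)) * Sj (n - j) (k + 1))
          = Sj n (k + 2) + Sj n (k + 1) := by
        rw [Finset.sum_range_succ' (fun j => ((n.choose j : Int)) * Sj (n - j) (k + 1)) n]
        rw [← ih (k + 1)]
        simp
      -- second sum = (k+1) * (Sj n (k+1) + Sj n (k+2))
      have hS2 : (∑ j ∈ Finset.range (n + 1), ((n.choose (j + 1) : Int)) * Sj (n - j) (k + 1))
          = ((k : Int) + 1) * (Sj n (k + 1) + Sj n (k + 2)) := by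
        rw [Finset.sum_range_succ]
        rw [Nat.choose_eq_zero_of_lt (by omega : n < n + 1)]
        have hcongr : (∑ j ∈ Finset.range n, ((n.choose (j + 1) : Int)) * Sj (n - j) (k + 1))
            = ∑ j ∈ Finset.range n,
                (((n.choose (j + 1) : Int)) * (((k : Int) + 1) * (Sj (n - (j + 1)) k + Sj (n - (j + 1)) (k + 1)))) := by
          refine Finset.sum_congr rfl ?_
          intro j hj
          have hjlt : j < n := Finset.mem_range.mp hj
          have h1 : n - j = (n - (j + 1)) + 1 := by omega
          rw [h1]
          show _ * (((k : Int) + 1) * (Sj (n - (j + 1)) k + Sj (n - (j + 1)) (k + 1))) = _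
          ring
        rw [hcongr]
        have : (∑ j ∈ Finset.range n,
                (((n.choose (j + 1) : Int)) * (((k : Int) + 1) * (Sj (n - (j + 1)) k + Sj (n - (j + 1)) (k + 1)))))
            = ((k : Int) + 1) *
                ((∑ j ∈ Finset.range n, ((n.choose (j + 1) : Int)) * Sj (n - (j + 1)) k)
                  + (∑ j ∈ Finset.range n, ((n.choose (j + 1) : Int)) * Sj (n - (j + 1)) (k + 1))) := by
          rw [← Finset.sum_add_distrib, Finset.mul_sum]
          refine Finset.sum_congr rfl ?_
          intro j _; ring
        rw [this, ← ih k, ← ih (k + 1)]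
        ring
      rw [hS1, hS2]
      ring

lemma sum_Sj_upto (m t : Nat) (h : m ≤ t) : ∑ k ∈ Finset.range (t + 1), Sj m k = fub m := by
  unfold fub
  symm
  refine Finset.sum_subset (by intro x hx; simp only [Finset.mem_range] at hx ⊢; omega) ?_
  intro k _ hk
  have : m + 1 ≤ k := by simpa using hk
  exact Sj_zero_of_lt m k (by omega)

lemma fub_rec (n : Nat) :
    fub (n + 1) = ∑ j ∈ Finset.range (n + 1), (((n + 1).choose (j + 1) : Int)) * fub (n - j) := by
  unfold fub
  rw [Finset.sum_range_succ' (fun k => Sj (n + 1) k) (n + 1), Sj_succ_zero, add_zero]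
  have hconv : ∀ k, Sj (n + 1) (k + 1)
      = ∑ j ∈ Finset.range (n + 1), (((n + 1).choose (j + 1) : Int)) * Sj (n - j) k := by
    intro k
    rw [Sj_conv (n + 1) k]
    refine Finset.sum_congr rfl ?_
    intro j _
    have : n + 1 - (j + 1) = n - j := by omega
    rw [this]
  calc (∑ k ∈ Finset.range (n + 1), Sj (n + 1) (k + 1))
      = ∑ k ∈ Finset.range (n + 1), ∑ j ∈ Finset.range (n + 1),
          (((n + 1).choose (j + 1) : Int)) * Sj (n - j) k := by
        exact Finset.sum_congr rfl (fun k _ => hconv k)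
    _ = ∑ j ∈ Finset.range (n + 1), ∑ k ∈ Finset.range (n + 1),
          (((n + 1).choose (j + 1) : Int)) * Sj (n - j) k := Finset.sum_comm
    _ = ∑ j ∈ Finset.range (n + 1), (((n + 1).choose (j + 1) : Int)) * fub (n - j) := by
        refine Finset.sum_congr rfl ?_
        intro j hj
        rw [← Finset.mul_sum]
        congr 1
        have hj' : j < n + 1 := Finset.mem_range.mp hj
        have : (n : Nat) - j ≤ n := by omega
        calc (∑ k ∈ Finset.range (n + 1), Sj (n - j) k)
            = ∑ k ∈ Finset.range (n + 1), Sj (n - j) k := rfl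
          _ = fub (n - j) := by
              have hn1 : n + 1 = n + 1 := rfl
              have := sum_Sj_upto (n - j) n (by omega)
              simpa using this
  -- (calc closes the goal)

-- generic helpers about lists built as maps over List.range
lemma map_range_set {α : Type} (f : Nat → α) (N p : Nat) (x : α) (_hp : p < N) :
    ((List.range N).map f).set p x = (List.range N).map (fun q => if q = p then x else f q) := by
  apply List.ext_getElem
  · simp
  · intro i h1 h2
    simp only [List.getElem_set, List.getElem_map, List.getElem_range]
    have hi : i < N := by simpa using h2
    by_cases h : p = i
    · subst h; simp
    · rw [if_neg h, if_neg (fun hh : i = p => h hh.symm)]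

lemma sum_map_range (f : Nat → Int) (N : Nat) :
    ((List.range N).map f).sum = ∑ j ∈ Finset.range N, f j := by
  induction N with
  | zero => simp
  | succ N ih => rw [List.range_succ, Finset.sum_range_succ]; simp [ih]

-- ===== the value of port A =====

-- final row i of A's table
def rowF (N i : Nat) : List Int := (List.range N).map (fun j => Sj (i + 1) (j + 1))

-- partially updated row i after inner-loop steps j = 1..t
def rowP (N i t : Nat) : List Int :=
  (List.range N).map (fun j => if j ≤ t then Sj (i + 1) (j + 1) else Sj 1 (j + 1))

-- table state: rows < i final, row i partially updated through t, rows > i still initial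
def dpP (N i t : Nat) : List (List Int) :=
  (List.range N).map (fun r => if r < i then rowF N r else if r = i then rowP N i t else rowF N 0)

lemma rowP_zero (N i : Nat) : rowP N i 0 = rowF N 0 := by
  unfold rowP rowF
  refine List.map_congr_left ?_
  intro j _
  by_cases h : j = 0
  · subst h; simp [Sj_one]
  · have : ¬ j ≤ 0 := by omega
    simp [this]

lemma rowP_full (N i : Nat) (_h : i ≤ N) : rowP N i i = rowF N i := by
  unfold rowP rowF
  refine List.map_congr_left ?_
  intro j _
  by_cases hj : j ≤ i
  · simp [hj]
  · rw [if_neg hj, Sj_zero_of_lt 1 (j + 1) (by omega), Sj_zero_of_lt (i + 1) (j + 1) (by omega)]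

-- one inner-loop step, at column j = t+1 ≤ i
lemma innerA_step (N i t : Nat) (hi1 : 1 ≤ i) (hiN : i < N) (ht : t + 1 ≤ i) :
    PySem.List.pySetD (dpP N i t) (i : Int)
      (PySem.List.pySetD (PySem.List.pyGetD (dpP N i t) (i : Int) []) ((t : Int) + 1)
        ((PySem.List.pyGetD (PySem.List.pyGetD (dpP N i t) ((i : Int) - 1) []) (((t : Int) + 1) - 1) 0
          + PySem.List.pyGetD (PySem.List.pyGetD (dpP N i t) ((i : Int) - 1) []) ((t : Int) + 1) 0)
          * (((t : Int) + 1) + 1)))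
    = dpP N i (t + 1) := by
  have htN : t + 1 < N := by omega
  have hc1 : ((t : Int) + 1) = (((t + 1 : Nat)) : Int) := by push_cast; ring
  have hc3 : ((i : Int) - 1) = (((i - 1 : Nat)) : Int) := by omega
  rw [hc1, hc3]
  have hc2 : ((((t + 1 : Nat)) : Int) - 1) = ((t : Nat) : Int) := by push_cast; ring
  rw [hc2]
  simp only [PySem.List.pySetD_natCast, PySem.List.pyGetD_natCast]
  unfold dpP
  rw [PySem.List.getD_map_range _ _ _ _ hiN,
      PySem.List.getD_map_range _ _ _ _ (by omega : i - 1 < N)]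
  rw [if_neg (lt_irrefl i), if_pos rfl, if_pos (by omega : i - 1 < i)]
  unfold rowF rowP
  rw [PySem.List.getD_map_range _ _ _ _ (by omega : t < N),
      PySem.List.getD_map_range _ _ _ _ htN]
  rw [map_range_set _ _ _ _ htN, map_range_set _ _ _ _ hiN]
  refine List.map_congr_left ?_
  intro r hr
  have hrN : r < N := by simpa using hr
  by_cases h1 : r = i
  · rw [if_pos h1, if_neg (by omega : ¬ r < i), if_pos h1]
    refine List.map_congr_left ?_
    intro j hj
    by_cases h2 : j = t + 1
    · subst h2
      rw [if_pos rfl, if_pos (le_refl (t + 1))]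
      conv_rhs => rw [show i = (i - 1) + 1 by omega]
      simp only [Sj]
      push_cast
      ring
    · rw [if_neg h2]
      by_cases h3 : j ≤ t
      · rw [if_pos h3, if_pos (by omega : j ≤ t + 1)]
      · rw [if_neg h3, if_neg (by omega : ¬ j ≤ t + 1)]
  · simp only [if_neg h1]

lemma zrow_set (N : Nat) (hN : 1 ≤ N) :
    ((List.range N).map (fun _ => (0 : Int))).set 0 1 = rowF N 0 := by
  rw [map_range_set _ _ _ _ (by omega : 0 < N)]
  unfold rowF
  refine List.map_congr_left ?_
  intro j _
  by_cases h : j = 0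
  · subst h; rw [if_pos rfl]; exact (Sj_one 0).symm
  · rw [if_neg h, Sj_zero_of_lt (0 + 1) (j + 1) (by omega)]

-- the dp[i][0] = 1 initialisation loop
lemma initA (N : Nat) : ∀ v : Nat, v ≤ N →
    (PySem.List.pyRange 0 (v : Int) 1).foldl
      (fun dp i => PySem.List.pySetD dp i (PySem.List.pySetD (PySem.List.pyGetD dp i []) 0 1))
      ((List.range N).map (fun _ => (List.range N).map (fun _ => (0 : Int))))
    = (List.range N).map (fun i => if i < v then rowF N 0 else (List.range N).map (fun _ => (0 : Int))) := by
  intro v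
  induction v with
  | zero =>
    rw [PySem.List.pyRange_one_eq_nil (by omega)]
    intro _
    simp
  | succ v ih =>
    intro hv
    have hvN : v < N := by omega
    have hc : ((v + 1 : Nat) : Int) = ((v : Nat) : Int) + 1 := by push_cast; ring
    rw [hc, PySem.List.pyRange_one_succ_right (by omega : (0 : Int) ≤ (v : Nat)), List.foldl_append,
        ih (by omega)]
    simp only [List.foldl_cons, List.foldl_nil]
    rw [PySem.List.pyGetD_natCast, PySem.List.getD_map_range _ _ _ _ hvN, if_neg (lt_irrefl v)]
    rw [PySem.List.pySetD_of_nonneg _ _ (by omega : (0 : Int) ≤ 0)]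
    have h0 : (0 : Int).toNat = 0 := rfl
    rw [h0, zrow_set N (by omega), PySem.List.pySetD_natCast, map_range_set _ _ _ _ hvN]
    refine List.map_congr_left ?_
    intro r _
    by_cases h1 : r = v
    · subst h1; rw [if_pos rfl, if_pos (by omega)]
    · rw [if_neg h1]
      by_cases h2 : r < v
      · rw [if_pos h2, if_pos (by omega)]
      · rw [if_neg h2, if_neg (by omega)]

-- processed table through outer index u
def dpA (N u : Nat) : List (List Int) :=
  (List.range N).map (fun i => if i ≤ u then rowF N i else rowF N 0)

lemma dpA_zero (N : Nat) :
    dpA N 0 = (List.range N).map (fun i => if i < N then rowF N 0 else (List.range N).map (fun _ => (0 : Int))) := by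
  unfold dpA
  refine List.map_congr_left ?_
  intro r hr
  have hrN : r < N := List.mem_range.mp hr
  rw [if_pos hrN]
  by_cases h : r = 0
  · subst h; rw [if_pos (le_refl 0)]
  · rw [if_neg (by omega : ¬ r ≤ 0)]

lemma dpP_zero_eq_dpA (N i : Nat) (hi : 1 ≤ i) : dpP N i 0 = dpA N (i - 1) := by
  unfold dpP dpA
  refine List.map_congr_left ?_
  intro r _
  by_cases h1 : r < i
  · rw [if_pos h1, if_pos (by omega : r ≤ i - 1)]
  · rw [if_neg h1, if_neg (by omega : ¬ r ≤ i - 1)]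
    by_cases h2 : r = i
    · rw [if_pos h2, rowP_zero N i]
    · rw [if_neg h2]

lemma dpP_full_eq_dpA (N i : Nat) (hi : i < N) : dpP N i i = dpA N i := by
  unfold dpP dpA
  refine List.map_congr_left ?_
  intro r _
  by_cases h1 : r < i
  · rw [if_pos h1, if_pos (by omega)]
  · by_cases h2 : r = i
    · rw [if_neg h1, if_pos h2, if_pos (by omega : r ≤ i), h2, rowP_full N i (by omega)]
    · rw [if_neg h1, if_neg h2, if_neg (by omega : ¬ r ≤ i)]

-- the inner loop, run through j = 1..t
lemma innerA (N i : Nat) (hi1 : 1 ≤ i) (hiN : i < N) : ∀ t : Nat, t ≤ i →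
    (PySem.List.pyRange 1 ((t : Nat) + 1 : Int) 1).foldl
      (fun dp j =>
        PySem.List.pySetD dp (i : Int)
          (PySem.List.pySetD (PySem.List.pyGetD dp (i : Int) []) j
            ((PySem.List.pyGetD (PySem.List.pyGetD dp ((i : Int) - 1) []) (j - 1) 0
              + PySem.List.pyGetD (PySem.List.pyGetD dp ((i : Int) - 1) []) j 0) * (j + 1))))
      (dpP N i 0)
    = dpP N i t := by
  intro t
  induction t with
  | zero =>
    rw [PySem.List.pyRange_one_eq_nil (by omega)]
    intro _
    simp
  | succ t ih =>
    intro ht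
    have hc : (((t + 1 : Nat) : Int) + 1) = (((t : Nat) : Int) + 1) + 1 := by push_cast; ring
    rw [hc, PySem.List.pyRange_one_succ_right (by omega : (1 : Int) ≤ ((t : Nat) : Int) + 1),
        List.foldl_append, ih (by omega)]
    simp only [List.foldl_cons, List.foldl_nil]
    exact innerA_step N i t hi1 hiN (by omega)

-- the outer loop, run through i = 1..u
lemma outerA (N : Nat) (hN : 3 ≤ N) : ∀ u : Nat, u ≤ N - 1 →
    (PySem.List.pyRange 1 ((u : Nat) + 1 : Int) 1).foldl
      (fun dp i =>
        (PySem.List.pyRange 1 (i + 1) 1).foldl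
          (fun dp j =>
            PySem.List.pySetD dp i
              (PySem.List.pySetD (PySem.List.pyGetD dp i []) j
                ((PySem.List.pyGetD (PySem.List.pyGetD dp (i - 1) []) (j - 1) 0
                  + PySem.List.pyGetD (PySem.List.pyGetD dp (i - 1) []) j 0) * (j + 1)))) dp)
      (dpA N 0)
    = dpA N u := by
  intro u
  induction u with
  | zero =>
    rw [PySem.List.pyRange_one_eq_nil (by omega)]
    intro _
    simp
  | succ u ih =>
    intro hu
    have hc : (((u + 1 : Nat) : Int) + 1) = (((u : Nat) : Int) + 1) + 1 := by push_cast; ring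
    rw [hc, PySem.List.pyRange_one_succ_right (by omega : (1 : Int) ≤ ((u : Nat) : Int) + 1),
        List.foldl_append, ih (by omega)]
    simp only [List.foldl_cons, List.foldl_nil]
    have hc2 : (((u : Nat) : Int) + 1) = ((u + 1 : Nat) : Int) := by push_cast; ring
    rw [hc2]
    have h1 : dpA N u = dpP N (u + 1) 0 := by
      rw [dpP_zero_eq_dpA N (u + 1) (by omega), Nat.add_sub_cancel]
    rw [h1, innerA N (u + 1) (by omega) (by omega) (u + 1) (le_refl _),
        dpP_full_eq_dpA N (u + 1) (by omega)]

lemma A_eval (N : Nat) (h3 : 3 ≤ N) : runningGame (N : Int) = fub N := by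
  have hn2 : ¬ ((N : Int) ≤ 2) := by omega
  simp only [runningGame, if_neg hn2]
  -- normalise range(n) and the initial table
  have hr : PySem.List.pyRange 0 (N : Int) 1 = (List.range N).map (fun k => ((k : Nat) : Int)) := by
    rw [PySem.List.pyRange_one]
    simp
  rw [hr]
  have hdp0 : ((List.range N).map (fun k => ((k : Nat) : Int))).map
        (fun _ => ((List.range N).map (fun k => ((k : Nat) : Int))).map (fun _ => (0 : Int)))
      = (List.range N).map (fun _ => (List.range N).map (fun _ => (0 : Int))) := by
    rw [List.map_map, List.map_map]
    rfl
  rw [hdp0]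
  -- dp[i][0] = 1 loop
  have hinit := initA N N (le_refl N)
  rw [show (PySem.List.pyRange 0 ((N : Nat) : Int) 1) = (List.range N).map (fun k => ((k : Nat) : Int)) from hr] at hinit
  rw [hinit, ← dpA_zero N]
  -- main double loop
  have hout := outerA N h3 (N - 1) (le_refl _)
  have hc : (((N - 1 : Nat) : Nat) : Int) + 1 = (N : Int) := by push_cast [Nat.cast_sub (by omega : 1 ≤ N)]; ring
  rw [hc] at hout
  rw [hout]
  -- dp[-1] is the fully updated last row
  have hfin : dpA N (N - 1) = (List.range N).map (fun r => rowF N r) := by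
    unfold dpA
    refine List.map_congr_left ?_
    intro r hr2
    rw [if_pos (by have := List.mem_range.mp hr2; omega)]
  rw [hfin]
  have hne : ((List.range N).map (fun r => rowF N r)) ≠ [] := by
    simp [List.map_eq_nil_iff, List.range_eq_nil]; omega
  rw [PySem.List.pyGetD_neg_one _ _ hne]
  rw [List.getLast_eq_getElem]
  simp only [List.getElem_map, List.length_map, List.length_range, List.getElem_range]
  -- sum of the last row is fub N
  unfold rowF
  rw [sum_map_range]
  have hN1 : N - 1 + 1 = N := by omega
  rw [hN1]
  unfold fub
  rw [Finset.sum_range_succ' (fun k => Sj N k) N]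
  rw [show Sj N 0 = 0 from by rw [← hN1]; exact Sj_succ_zero (N - 1)]
  rw [add_zero]

lemma fub_zero : fub 0 = 1 := by
  unfold fub
  rw [Finset.sum_range_one]
  rfl

-- B's inner loop: after k = 1..t, c = C(M,t) and total = Σ_{j<t} C(M,j+1)·fub(M-1-j)
lemma innerB (M : Nat) : ∀ t : Nat, t ≤ M →
    (PySem.List.pyRange 1 ((t : Int) + 1) 1).foldl
      (fun (st : Int × Int) k =>
        (PySem.Int.floordiv (st.1 * (((M : Nat) : Int) - k + 1)) k,
         st.2 + PySem.Int.floordiv (st.1 * (((M : Nat) : Int) - k + 1)) k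
             * PySem.List.pyGetD ((List.range M).map (fun r => fub r)) (((M : Nat) : Int) - k) 0))
      (1, 0)
    = ((M.choose t : Int), ∑ j ∈ Finset.range t, ((M.choose (j + 1) : Int)) * fub (M - 1 - j)) := by
  intro t
  induction t with
  | zero =>
    rw [PySem.List.pyRange_one_eq_nil (by omega)]
    intro _
    simp
  | succ t ih =>
    intro ht
    have hc : (((t + 1 : Nat) : Int) + 1) = (((t : Nat) : Int) + 1) + 1 := by push_cast; ring
    rw [hc, PySem.List.pyRange_one_succ_right (by omega : (1 : Int) ≤ ((t : Nat) : Int) + 1),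
        List.foldl_append, ih (by omega)]
    simp only [List.foldl_cons, List.foldl_nil]
    have hc2 : (((t : Nat) : Int) + 1) = ((t + 1 : Nat) : Int) := by push_cast; ring
    rw [hc2]
    -- the new value of c is C(M, t+1), by the exact multiplicative update
    have hMt : (((M : Nat) : Int) - ((t + 1 : Nat) : Int) + 1) = ((M - t : Nat) : Int) := by
      push_cast; omega
    have hcval : PySem.Int.floordiv ((M.choose t : Int) * (((M : Nat) : Int) - ((t + 1 : Nat) : Int) + 1)) ((t + 1 : Nat) : Int)
        = ((M.choose (t + 1) : Int)) := by
      rw [hMt, ← Int.natCast_mul, PySem.Int.floordiv_natCast]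
      rw [← Nat.choose_succ_right_eq M t, Nat.mul_div_cancel _ (by omega : 0 < t + 1)]
    have hidx : (((M : Nat) : Int) - ((t + 1 : Nat) : Int)) = ((M - (t + 1) : Nat) : Int) := by
      push_cast; omega
    have haread : PySem.List.pyGetD ((List.range M).map (fun r => fub r)) (((M : Nat) : Int) - ((t + 1 : Nat) : Int)) 0
        = fub (M - 1 - t) := by
      rw [hidx, PySem.List.pyGetD_natCast, PySem.List.getD_map_range _ _ _ _ (by omega : M - (t + 1) < M)]
      congr 1
      omega
    rw [hcval, haread, Finset.sum_range_succ]
  -- (both components now agree)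

-- B's outer loop builds [fub 0, …, fub v]
lemma outerB : ∀ v : Nat,
    (PySem.List.pyRange 1 ((v : Int) + 1) 1).foldl
      (fun (a : List Int) m =>
        a ++ [((PySem.List.pyRange 1 (m + 1) 1).foldl
          (fun (st : Int × Int) k =>
            (PySem.Int.floordiv (st.1 * (m - k + 1)) k,
             st.2 + PySem.Int.floordiv (st.1 * (m - k + 1)) k * PySem.List.pyGetD a (m - k) 0))
          (1, 0)).2]) [1]
    = (List.range (v + 1)).map (fun r => fub r) := by
  intro v
  induction v with
  | zero =>
    rw [PySem.List.pyRange_one_eq_nil (by omega)]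
    show [1] = (List.range 1).map (fun r => fub r)
    rw [List.range_one, List.map_cons, List.map_nil, fub_zero]
  | succ v ih =>
    have hc : (((v + 1 : Nat) : Int) + 1) = (((v : Nat) : Int) + 1) + 1 := by push_cast; ring
    rw [hc, PySem.List.pyRange_one_succ_right (by omega : (1 : Int) ≤ ((v : Nat) : Int) + 1),
        List.foldl_append, ih]
    simp only [List.foldl_cons, List.foldl_nil]
    have hc2 : (((v : Nat) : Int) + 1) = ((v + 1 : Nat) : Int) := by push_cast; ring
    rw [hc2]
    rw [innerB (v + 1) (v + 1) (le_refl _)]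
    -- the appended entry is fub (v+1), by the convolution recurrence
    have hstep : (∑ j ∈ Finset.range (v + 1), (((v + 1).choose (j + 1) : Int)) * fub (v + 1 - 1 - j))
        = fub (v + 1) := by
      rw [fub_rec v]
      rfl
    rw [hstep]
    rw [show List.range (v + 1 + 1) = List.range (v + 1) ++ [v + 1] from List.range_succ,
        List.map_append, List.map_cons, List.map_nil]

lemma B_eval (N : Nat) (h3 : 3 ≤ N) : runningGame_alt (N : Int) = fub N := by
  have hn2 : ¬ ((N : Int) ≤ 2) := by omega
  simp only [runningGame_alt, if_neg hn2]
  rw [outerB N]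
  rw [PySem.List.pyGetD_natCast, PySem.List.getD_map_range _ _ _ _ (by omega : N < N + 1)]

-- ===== VERDICT (by name: the statement is the Claim_ definition above) =====
theorem runningGame_spec : Claim_equal_runningGame := by
  intro n _
  unfold Spec_runningGame
  by_cases h : n ≤ 2
  · unfold runningGame runningGame_alt
    simp [h]
  · have h3 : 3 ≤ n := by omega
    obtain ⟨N, rfl⟩ : ∃ N : Nat, n = (N : Int) := ⟨n.toNat, by omega⟩
    have hN : 3 ≤ N := by exact_mod_cast h3
    rw [A_eval N hN, B_eval N hN]
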